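-- pv_equiv track=rewrite | github.com/leprohonmalo/Projet_Long | src/toto.py | find_dist_to_gap
-- ===== SOURCE A (Python) =====
-- def find_dist_to_gap(a, sorted_list):
--     """ This function takes a position and a list of gap positions and returns
--         the distance between the position and the closest gap in the list.
--
--         Parameters:
--             - a : an int representing a position.
--             - sorted_list : a sorted list of int representing gap positions from
--             an alignment.
--
--         Output:
--             - an int representing a position distance.
--     """
--     if a < sorted_list[0]:
--         return sorted_list[0] - a
--     if a > sorted_list[-1]:
--         return a - sorted_list[-1]
--     for i in range(len(sorted_list)-1):
--         if (a >= sorted_list[i]) and (a <= sorted_list[i+1]):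
--             d1 = a - sorted_list[i]
--             d2 = sorted_list[i+1] - a
--             return min(d1, d2)
-- ===== SOURCE B (Python) =====
-- def find_dist_to_gap(a, sorted_list):
--     best = abs(a - sorted_list[0])
--     for x in sorted_list[1:]:
--         d = abs(a - x)
--         if d < best:
--             best = d
--     return best
-- ===== Notes on version B (the rewrite author's own statement) =====
-- stated objective: simpler
-- what changed: Replaces A's three-way guard plus bracketing-interval scan with a single global-minimum scan of abs(a - x) over the list.
-- outside the precondition, e.g. on find_dist_to_gap(0, [5, 1]): A returns 5, B returns 1; on find_dist_to_gap(3, [3]): A returns None, B returns 0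
import Mathlib
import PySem

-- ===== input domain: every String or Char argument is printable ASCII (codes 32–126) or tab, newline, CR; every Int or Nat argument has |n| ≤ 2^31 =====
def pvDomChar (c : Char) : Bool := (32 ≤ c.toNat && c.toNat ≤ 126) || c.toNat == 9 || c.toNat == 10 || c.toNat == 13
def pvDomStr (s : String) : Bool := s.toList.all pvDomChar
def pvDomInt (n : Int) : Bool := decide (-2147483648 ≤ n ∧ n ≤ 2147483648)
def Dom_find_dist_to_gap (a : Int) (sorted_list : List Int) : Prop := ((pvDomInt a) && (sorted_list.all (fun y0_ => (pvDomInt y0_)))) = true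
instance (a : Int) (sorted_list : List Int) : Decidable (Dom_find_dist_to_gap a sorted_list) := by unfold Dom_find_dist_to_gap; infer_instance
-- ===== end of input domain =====

-- B replaces A's guard-plus-bracketing-interval logic with a single global-minimum scan
-- of abs(a - x); objective: simpler.

-- ===== PORT A =====
-- A's for-loop over i in range(len-1), comparing sorted_list[i] and sorted_list[i+1],
-- returning at the first bracketing pair; ported as recursion over adjacent pairs.
def pvALoop (a : Int) : List Int → Option Int
  | x :: y :: rest =>
      if x ≤ a ∧ a ≤ y then some (min (a - x) (y - a)) else pvALoop a (y :: rest)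
  | _ => none

def find_dist_to_gap (a : Int) (sorted_list : List Int) : Int :=
  match PySem.List.pyGet? sorted_list 0, PySem.List.pyGet? sorted_list (-1) with
  | some h, some t =>
      if a < h then h - a
      else if a > t then a - t
      else (pvALoop a sorted_list).getD 0   -- falling off the loop returns None in Python: outside Pre_
  | _, _ => 0   -- empty list: IndexError in Python, outside Pre_

-- ===== PORT B =====
def find_dist_to_gap_alt (a : Int) (sorted_list : List Int) : Int :=
  match sorted_list with
  | [] => 0   -- Python raises IndexError here, outside Pre_
  | x :: rest => rest.foldl (fun best y => min best |a - y|) |a - x|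

-- ===== PRECONDITION & SPEC =====
-- Pre_ restricts to the function's documented domain: a nonempty nondecreasing list. It
-- also excludes the one corner where A falls off its loop and returns None (a singleton
-- list equal to a): on the empty list A raises IndexError, on unsorted lists A may return
-- None or an accidental first-bracket value, and None is not an int.
def Pre_find_dist_to_gap (a : Int) (sorted_list : List Int) : Prop :=
  sorted_list ≠ [] ∧ List.Pairwise (· ≤ ·) sorted_list ∧
    (2 ≤ sorted_list.length ∨ a ≠ sorted_list.headI)
instance (a : Int) (sorted_list : List Int) : Decidable (Pre_find_dist_to_gap a sorted_list) := by
  unfold Pre_find_dist_to_gap; infer_instance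

def pvWitness_find_dist_to_gap : Int × List Int := (4, [1, 3, 8])

def Spec_find_dist_to_gap (a : Int) (sorted_list : List Int) (out : Int) : Prop := out = find_dist_to_gap_alt a sorted_list
instance (a : Int) (sorted_list : List Int) (out : Int) : Decidable (Spec_find_dist_to_gap a sorted_list out) := by unfold Spec_find_dist_to_gap; infer_instance

-- ===== CLAIM (what is proved, stated in full; the proofs are below) =====
def Claim_equal_find_dist_to_gap : Prop := ∀ (a : Int) (sorted_list : List Int), Dom_find_dist_to_gap a sorted_list → Pre_find_dist_to_gap a sorted_list → Spec_find_dist_to_gap a sorted_list (find_dist_to_gap a sorted_list)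

-- ===== LEMMAS AND PROOFS =====

-- B's fold, abbreviated for the lemmas.
def pvBF (a : Int) (b : Int) (l : List Int) : Int := l.foldl (fun best y => min best |a - y|) b

theorem pvBF_eq (a b : Int) (l : List Int) :
    find_dist_to_gap_alt a (b :: l) = pvBF a |a - b| l := rfl

theorem pvBF_le_init (a b : Int) (l : List Int) : pvBF a b l ≤ b := by
  induction l generalizing b with
  | nil => simp [pvBF]
  | cons x xs ih =>
      calc pvBF a b (x :: xs) = pvBF a (min b |a - x|) xs := rfl
        _ ≤ min b |a - x| := ih _
        _ ≤ b := min_le_left _ _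

theorem pvBF_le_mem (a b t : Int) (l : List Int) (ht : t ∈ l) : pvBF a b l ≤ |a - t| := by
  induction l generalizing b with
  | nil => cases ht
  | cons x xs ih =>
      rcases List.mem_cons.mp ht with h | h
      · subst h
        calc pvBF a b (t :: xs) = pvBF a (min b |a - t|) xs := rfl
          _ ≤ min b |a - t| := pvBF_le_init _ _ _
          _ ≤ |a - t| := min_le_right _ _
      · exact ih _ h

theorem pvBF_ge (a b c : Int) (l : List Int) (hb : c ≤ b) (hl : ∀ t ∈ l, c ≤ |a - t|) :
    c ≤ pvBF a b l := by
  induction l generalizing b with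
  | nil => exact hb
  | cons x xs ih =>
      exact ih _ (le_min hb (hl x (List.mem_cons_self))) (fun t ht => hl t (List.mem_cons_of_mem _ ht))

theorem pvBF_const (a b : Int) (l : List Int) (hl : ∀ t ∈ l, b ≤ |a - t|) :
    pvBF a b l = b :=
  le_antisymm (pvBF_le_init _ _ _) (pvBF_ge a b b l le_rfl hl)

-- Pairwise gives: every member of the tail is ≥ the head.
theorem pvChain_head_le (x : Int) (l : List Int) (h : List.Pairwise (· ≤ ·) (x :: l)) :
    ∀ t ∈ l, x ≤ t := (List.pairwise_cons.mp h).1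

theorem pvChain_le_last (l : List Int) (h : List.Pairwise (· ≤ ·) l) (hne : l ≠ []) :
    ∀ t ∈ l, t ≤ l.getLast hne := by
  induction l with
  | nil => cases hne rfl
  | cons x xs ih =>
      intro t ht
      cases xs with
      | nil => simp at ht; simp [ht]
      | cons y ys =>
          have h2 := List.pairwise_cons.mp h
          rcases List.mem_cons.mp ht with rfl | ht
          · have : t ≤ y := h2.1 y List.mem_cons_self
            have hmem : y ∈ y :: ys := List.mem_cons_self
            exact le_trans this (by simpa [List.getLast_cons] using ih h2.2 (by simp) y hmem)
          · simpa [List.getLast_cons] using ih h2.2 (by simp) t ht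

-- main lemma for the interior case: if x ≤ a ≤ last, the loop finds a bracketing pair
-- and its value is the global minimum of |a - ·|.
theorem pvLoop_eq (a : Int) (l : List Int) (hc : List.Pairwise (· ≤ ·) l)
    (hx : ∃ x xs, l = x :: xs ∧ x ≤ a)
    (hlast : ∀ (hne : l ≠ []), a ≤ l.getLast hne) :
    (pvALoop a l).getD 0 = find_dist_to_gap_alt a l := by
  induction l with
  | nil => rcases hx with ⟨x, xs, h, _⟩; cases h
  | cons x xs ih =>
      rcases hx with ⟨x', xs', hx', hxa⟩
      cases hx'
      cases xs with
      | nil =>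
          -- singleton with x ≤ a ≤ x forces a = x; the loop returns none, getD 0 = 0 = |a - x|.
          have hax : a ≤ x := by simpa using hlast (by simp)
          have : a = x := le_antisymm hax hxa
          subst this
          simp [pvALoop, find_dist_to_gap_alt]
      | cons y ys =>
          have h2 := List.pairwise_cons.mp hc
          have hxy : x ≤ y := h2.1 y List.mem_cons_self
          by_cases hay : a ≤ y
          · -- bracketing pair found here
            have hstep : pvALoop a (x :: y :: ys) = some (min (a - x) (y - a)) := by
              simp [pvALoop, hxa, hay]
            rw [hstep]
            simp only [Option.getD_some]
            have habs_x : |a - x| = a - x := abs_of_nonneg (by omega)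
            have habs_y : |a - y| = y - a := by rw [abs_of_nonpos (by omega)]; ring
            have : find_dist_to_gap_alt a (x :: y :: ys)
                = pvBF a (min (a - x) (y - a)) ys := by
              simp [pvBF_eq, pvBF, habs_x, habs_y]
            rw [this]
            refine (pvBF_const a _ ys ?_).symm
            intro t ht
            have hyt : y ≤ t := pvChain_head_le y ys h2.2 t ht
            have : |a - t| = t - a := by rw [abs_of_nonpos (by omega)]; ring
            omega
          · -- a > y: skip to the tail; the head's distance is dominated by |a - y|
            push Not at hay
            have hstep : pvALoop a (x :: y :: ys) = pvALoop a (y :: ys) := by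
              simp [pvALoop]; omega
            rw [hstep]
            have htail := ih h2.2 ⟨y, ys, rfl, le_of_lt hay⟩
              (fun hne => by
                have := hlast (by simp)
                simpa [List.getLast_cons] using this)
            rw [htail, pvBF_eq, pvBF_eq]
            -- drop the head from B's fold: |a - y| ≤ |a - x|
            have habs_x : |a - x| = a - x := abs_of_nonneg (by omega)
            have habs_y : |a - y| = a - y := abs_of_nonneg (by omega)
            have hr : pvBF a |a - x| (y :: ys) = pvBF a (min |a - x| |a - y|) ys := rfl
            have hmin : min |a - x| |a - y| = |a - y| := by
              rw [habs_x, habs_y]; omega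
            rw [hr, hmin]

-- ===== VERDICT (by name: the statement is the Claim_ definition above) =====
theorem find_dist_to_gap_spec : Claim_equal_find_dist_to_gap := by
  intro a l _ hpre
  obtain ⟨hne, hc, hcase⟩ := hpre
  unfold Spec_find_dist_to_gap
  cases l with
  | nil => cases hne rfl
  | cons x xs =>
      have hhead : PySem.List.pyGet? (x :: xs) 0 = some x := by
        simp [PySem.List.pyGet?, PySem.List.pyIdx?]
      have hlast_mem := List.getLast_mem (l := x :: xs) (by simp)
      have htail : PySem.List.pyGet? (x :: xs) (-1) =
          some ((x :: xs).getLast (by simp)) := by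
        rw [show (-1 : Int) = -((x :: xs).length : Int) + ((x :: xs).length - 1 : Int) by ring]
        simp [PySem.List.pyGet?, PySem.List.pyIdx?]
        simp [List.getLast_eq_getElem]
        rfl
      unfold find_dist_to_gap
      rw [hhead, htail]
      set t := (x :: xs).getLast (by simp) with ht
      by_cases h1 : a < x
      · -- all elements ≥ x > a: B's min is x - a
        simp only [if_pos h1]
        have habs : |a - x| = x - a := by rw [abs_of_nonpos (by omega)]; ring
        have : find_dist_to_gap_alt a (x :: xs) = x - a := by
          rw [pvBF_eq, habs]
          exact pvBF_const a _ xs (fun u hu => by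
            have := pvChain_head_le x xs hc u hu
            have : |a - u| = u - a := by rw [abs_of_nonpos (by omega)]; ring
            omega)
        omega
      · simp only [if_neg h1]
        by_cases h2 : a > t
        · -- all elements ≤ t < a: B's min is a - t, reached at the last element
          simp only [if_pos h2]
          have hle := pvChain_le_last (x :: xs) hc (by simp)
          have hub : ∀ u ∈ x :: xs, a - t ≤ |a - u| := by
            intro u hu
            have hut : u ≤ t := hle u hu
            have : |a - u| = a - u := abs_of_nonneg (by omega)
            omega
          have hge : a - t ≤ find_dist_to_gap_alt a (x :: xs) := by
            rw [pvBF_eq]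
            exact pvBF_ge a _ _ xs (hub x (by simp)) (fun u hu => hub u (List.mem_cons_of_mem _ hu))
          have hle2 : find_dist_to_gap_alt a (x :: xs) ≤ a - t := by
            rcases List.mem_cons.mp hlast_mem with h | h
            · rw [pvBF_eq]
              have : |a - t| = a - t := abs_of_nonneg (by omega)
              rw [← h, this] at *
              exact pvBF_le_init _ _ _
            · have := pvBF_le_mem a |a - x| t xs h
              rw [pvBF_eq]
              have habs : |a - t| = a - t := abs_of_nonneg (by omega)
              omega
          omega
        · -- interior case
          simp only [if_neg h2]
          push Not at h1 h2
          -- rule out the excluded singleton a = x corner? not needed: handled in pvLoop_eq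
          exact pvLoop_eq a (x :: xs) hc ⟨x, xs, rfl, h1⟩ (fun hne' => h2)
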